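-- pv_equiv track=rewrite | github.com/sueun-dev/crypto-trading-bot | src/analysis/post_trade_analyzer.py | _get_lesson_recommendations
-- ===== SOURCE A (Python) =====
-- from typing import Any, Dict, List
--
-- def _get_lesson_recommendations(lessons: List[str]) -> List[str]:
--     """Get recommendations based on lessons.
--
--     Args:
--         lessons: List of lessons learned.
--
--     Returns:
--         List of recommendation strings.
--     """
--     recommendations = []
--
--     if any('entry timing' in lesson for lesson in lessons):
--         recommendations.append("Enhance entry signal confirmation requirements")
--
--     if any('support' in lesson for lesson in lessons):
--         recommendations.append("Add support/resistance analysis to entry criteria")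
--
--     if any('panic' in lesson for lesson in lessons):
--         recommendations.append("Implement market sentiment filters for entries")
--
--     return recommendations
-- ===== SOURCE B (Python) =====
-- from typing import List
--
-- def _get_lesson_recommendations(lessons: List[str]) -> List[str]:
--     """Single pass: accumulate three flags over lessons, then emit recommendations in fixed order."""
--     timing = support = panic = False
--     for lesson in lessons:
--         if 'entry timing' in lesson:
--             timing = True
--         if 'support' in lesson:
--             support = True
--         if 'panic' in lesson:
--             panic = True
--     out = []
--     if timing:
--         out.append("Enhance entry signal confirmation requirements")
--     if support:
--         out.append("Add support/resistance analysis to entry criteria")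
--     if panic:
--         out.append("Implement market sentiment filters for entries")
--     return out
-- ===== Notes on version B (the rewrite author's own statement) =====
-- stated objective: alternative
-- what changed: Replaces three independent any()-scans of lessons by one pass that accumulates three boolean flags and then emits the fixed recommendation strings in order.
import Mathlib
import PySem

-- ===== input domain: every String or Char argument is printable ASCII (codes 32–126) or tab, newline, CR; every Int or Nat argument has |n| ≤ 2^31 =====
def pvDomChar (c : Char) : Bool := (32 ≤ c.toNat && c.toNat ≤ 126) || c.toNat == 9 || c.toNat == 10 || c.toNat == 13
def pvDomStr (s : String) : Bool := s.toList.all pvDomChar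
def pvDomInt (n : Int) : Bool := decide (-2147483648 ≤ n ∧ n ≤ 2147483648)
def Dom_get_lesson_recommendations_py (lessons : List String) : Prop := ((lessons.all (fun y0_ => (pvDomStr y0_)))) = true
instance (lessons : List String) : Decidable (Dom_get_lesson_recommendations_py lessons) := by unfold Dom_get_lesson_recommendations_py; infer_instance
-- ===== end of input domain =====

-- B replaces three independent any-scans by one pass accumulating three boolean flags (alternative decomposition, same cost).


-- ===== PORT A =====
def get_lesson_recommendations_py (lessons : List String) : List String :=
  let recommendations : List String := []
  let recommendations :=
    if lessons.any (fun lesson => PySem.Str.isIn "entry timing" lesson) then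
      recommendations ++ ["Enhance entry signal confirmation requirements"]
    else recommendations
  let recommendations :=
    if lessons.any (fun lesson => PySem.Str.isIn "support" lesson) then
      recommendations ++ ["Add support/resistance analysis to entry criteria"]
    else recommendations
  let recommendations :=
    if lessons.any (fun lesson => PySem.Str.isIn "panic" lesson) then
      recommendations ++ ["Implement market sentiment filters for entries"]
    else recommendations
  recommendations

-- ===== PORT B =====
def get_lesson_recommendations_py_alt (lessons : List String) : List String :=
  let flags := lessons.foldl
    (fun (f : Bool × Bool × Bool) lesson =>
      ((if PySem.Str.isIn "entry timing" lesson then true else f.1),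
       (if PySem.Str.isIn "support" lesson then true else f.2.1),
       (if PySem.Str.isIn "panic" lesson then true else f.2.2)))
    (false, false, false)
  let out : List String := []
  let out := if flags.1 then out ++ ["Enhance entry signal confirmation requirements"] else out
  let out := if flags.2.1 then out ++ ["Add support/resistance analysis to entry criteria"] else out
  let out := if flags.2.2 then out ++ ["Implement market sentiment filters for entries"] else out
  out

-- ===== PRECONDITION & SPEC =====
def Spec_get_lesson_recommendations_py (lessons : List String) (out : List String) : Prop := out = get_lesson_recommendations_py_alt lessons
instance (lessons : List String) (out : List String) : Decidable (Spec_get_lesson_recommendations_py lessons out) := by unfold Spec_get_lesson_recommendations_py; infer_instance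

-- ===== CLAIM (what is proved, stated in full; the proofs are below) =====
def Claim_equal_get_lesson_recommendations_py : Prop := ∀ (lessons : List String), Dom_get_lesson_recommendations_py lessons → Spec_get_lesson_recommendations_py lessons (get_lesson_recommendations_py lessons)

-- ===== LEMMAS AND PROOFS =====
theorem pv_foldl_flags (lessons : List String) (a b c : Bool) :
    lessons.foldl
      (fun (f : Bool × Bool × Bool) lesson =>
        ((if PySem.Str.isIn "entry timing" lesson then true else f.1),
         (if PySem.Str.isIn "support" lesson then true else f.2.1),
         (if PySem.Str.isIn "panic" lesson then true else f.2.2)))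
      (a, b, c)
    = (a || lessons.any (fun l => PySem.Str.isIn "entry timing" l),
       b || lessons.any (fun l => PySem.Str.isIn "support" l),
       c || lessons.any (fun l => PySem.Str.isIn "panic" l)) := by
  induction lessons generalizing a b c with
  | nil => simp
  | cons x xs ih =>
      simp only [List.foldl_cons, List.any_cons, ih]
      refine Prod.ext ?_ (Prod.ext ?_ ?_) <;>
        simp [Bool.or_comm, Bool.or_assoc]

-- ===== VERDICT (by name: the statement is the Claim_ definition above) =====
theorem get_lesson_recommendations_py_spec : Claim_equal_get_lesson_recommendations_py := by
  intro lessons _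
  unfold Spec_get_lesson_recommendations_py get_lesson_recommendations_py get_lesson_recommendations_py_alt
  simp only [pv_foldl_flags, Bool.false_or]
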